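-- pv_equiv track=rewrite | github.com/andy560/finserv-issueflow-demo | process_issues.py | _guess_file
-- ===== SOURCE A (Python) =====
-- def _guess_file(issue):
--     title = issue["title"].lower()
--     if any(k in title for k in ["divide", "interest", "discount", "calculator"]):
--         return "calculator.py"
--     if any(k in title for k in ["email", "mask", "account", "auth", "password"]):
--         return "auth.py"
--     if any(k in title for k in ["currency", "format", "truncate", "date", "utils"]):
--         return "utils.py"
--     return "unknown"
-- ===== SOURCE B (Python) =====
-- KEYWORDS = [
--     ("divide", 0), ("interest", 0), ("discount", 0), ("calculator", 0),
--     ("email", 1), ("mask", 1), ("account", 1), ("auth", 1), ("password", 1),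
--     ("currency", 2), ("format", 2), ("truncate", 2), ("date", 2), ("utils", 2),
-- ]
-- FILES = ["calculator.py", "auth.py", "utils.py", "unknown"]
--
--
-- def _guess_file(issue):
--     title = issue["title"].lower()
--     best = 3
--     for i in range(len(title)):
--         for kw, pr in KEYWORDS:
--             if pr < best and title[i:i + len(kw)] == kw:
--                 best = pr
--     return FILES[best]
-- ===== Notes on version B (the rewrite author's own statement) =====
-- stated objective: alternative
-- what changed: Instead of three sequential any(k in title) substring-search branches, B makes a single left-to-right sweep over the title's positions, comparing each keyword as a slice at that position against a flat (keyword, priority) table and keeping the minimum priority seen; the answer is looked up in a file table indexed by that minimum.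
import Mathlib
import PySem

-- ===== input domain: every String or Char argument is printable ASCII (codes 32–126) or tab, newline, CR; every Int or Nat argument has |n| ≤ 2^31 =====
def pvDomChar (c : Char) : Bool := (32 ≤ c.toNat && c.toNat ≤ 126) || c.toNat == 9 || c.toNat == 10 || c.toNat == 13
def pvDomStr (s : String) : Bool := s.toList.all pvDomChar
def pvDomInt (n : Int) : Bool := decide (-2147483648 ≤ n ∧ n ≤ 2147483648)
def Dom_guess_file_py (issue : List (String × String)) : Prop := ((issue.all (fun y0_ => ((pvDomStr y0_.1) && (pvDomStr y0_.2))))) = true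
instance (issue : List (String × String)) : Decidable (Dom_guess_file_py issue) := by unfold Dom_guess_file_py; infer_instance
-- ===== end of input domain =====

-- B replaces A's three sequential any(k in title) branches by one sweep over title positions that keeps the minimum matching rule priority (alternative; same cost). Pre_ excludes only issues lacking a "title" key, where A raises KeyError.


-- ===== PORT A =====
def guess_file_py (issue : List (String × String)) : String :=
  match (PySem.Dict.mk issue).get? "title" with
  | none => ""  -- KeyError in Python; excluded by Pre_
  | some t =>
    let title := PySem.Str.lower t
    if (["divide", "interest", "discount", "calculator"].any (fun k => PySem.Str.isIn k title)) then
      "calculator.py"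
    else if (["email", "mask", "account", "auth", "password"].any (fun k => PySem.Str.isIn k title)) then
      "auth.py"
    else if (["currency", "format", "truncate", "date", "utils"].any (fun k => PySem.Str.isIn k title)) then
      "utils.py"
    else
      "unknown"

-- ===== PORT B =====
-- flat (keyword, priority) table and the file table, as in Source B
def pvKeywords : List (List Char × Nat) :=
  [("divide".toList, 0), ("interest".toList, 0), ("discount".toList, 0), ("calculator".toList, 0),
   ("email".toList, 1), ("mask".toList, 1), ("account".toList, 1), ("auth".toList, 1), ("password".toList, 1),
   ("currency".toList, 2), ("format".toList, 2), ("truncate".toList, 2), ("date".toList, 2), ("utils".toList, 2)]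

def pvFiles : List String := ["calculator.py", "auth.py", "utils.py", "unknown"]

-- the position sweep of Source B: for i in range(len(title)): for kw, pr in KEYWORDS: if pr < best and title[i:i+len(kw)] == kw: best = pr
def pvBest (title : List Char) : Nat :=
  (List.range title.length).foldl
    (fun (best : Nat) (i : Nat) => pvKeywords.foldl
      (fun b kp =>
        if kp.2 < b ∧ PySem.List.slice title (some (i : Int)) (some ((i : Int) + (kp.1.length : Int))) = kp.1
        then kp.2 else b)
      best) 3

def guess_file_py_alt (issue : List (String × String)) : String :=
  match (PySem.Dict.mk issue).get? "title" with
  | none => ""  -- KeyError in Python; excluded by Pre_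
  | some t =>
    -- FILES[best]: best is always 0..3, so the index is in range and the default is never used
    pvFiles.getD (pvBest (PySem.Str.lower t).toList) ""

-- ===== PRECONDITION & SPEC =====
-- Pre_ excludes only issues without a "title" key, on which A (and B) raise KeyError.
def Pre_guess_file_py (issue : List (String × String)) : Prop :=
  "title" ∈ issue.map Prod.fst
instance (issue : List (String × String)) : Decidable (Pre_guess_file_py issue) := by
  unfold Pre_guess_file_py; infer_instance

def pvWitness_guess_file_py : (List (String × String)) := [("title", "Fix interest rounding")]

def Spec_guess_file_py (issue : List (String × String)) (out : String) : Prop := out = guess_file_py_alt issue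
instance (issue : List (String × String)) (out : String) : Decidable (Spec_guess_file_py issue out) := by unfold Spec_guess_file_py; infer_instance

-- ===== CLAIM (what is proved, stated in full; the proofs are below) =====
def Claim_equal_guess_file_py : Prop := ∀ (issue : List (String × String)), Dom_guess_file_py issue → Pre_guess_file_py issue → Spec_guess_file_py issue (guess_file_py issue)

-- ===== LEMMAS AND PROOFS =====

-- a "priority fold" (if cond then min with priority else keep) is ≤ p iff it started ≤ p or some passing element has priority ≤ p
theorem foldl_prio_le {α : Type} (cond : α → Prop) [DecidablePred cond] (f : α → Nat) :
    ∀ (l : List α) (b p : Nat),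
      (l.foldl (fun b x => if cond x then min b (f x) else b) b ≤ p) ↔
        (b ≤ p ∨ ∃ x ∈ l, cond x ∧ f x ≤ p) := by
  intro l
  induction l with
  | nil => simp
  | cons a l ih =>
    intro b p
    simp only [List.foldl_cons, ih, List.mem_cons]
    by_cases h : cond a
    · simp only [if_pos h]
      constructor
      · rintro (hb | ⟨x, hx, hc, hf⟩)
        · rcases min_le_iff.mp hb with h1 | h1
          · exact Or.inl h1
          · exact Or.inr ⟨a, Or.inl rfl, h, h1⟩
        · exact Or.inr ⟨x, Or.inr hx, hc, hf⟩
      · rintro (hb | ⟨x, hx | hx, hc, hf⟩)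
        · exact Or.inl (le_trans (min_le_left _ _) hb)
        · subst hx; exact Or.inl (le_trans (min_le_right _ _) hf)
        · exact Or.inr ⟨x, hx, hc, hf⟩
    · simp only [if_neg h]
      constructor
      · rintro (hb | ⟨x, hx, hc, hf⟩)
        · exact Or.inl hb
        · exact Or.inr ⟨x, Or.inr hx, hc, hf⟩
      · rintro (hb | ⟨x, hx | hx, hc, hf⟩)
        · exact Or.inl hb
        · subst hx; exact absurd hc h
        · exact Or.inr ⟨x, hx, hc, hf⟩

-- folding an inner fold over each i equals one fold over the flattened pair list
theorem foldl_foldl_flatMap {α β γ : Type} (g : β → γ → β) (h : α → List γ) :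
    ∀ (l : List α) (b : β),
      l.foldl (fun b i => (h i).foldl g b) b = (l.flatMap h).foldl g b := by
  intro l
  induction l with
  | nil => simp
  | cons a l ih => intro b; simp [List.foldl_append, ih]

-- the port's guarded slice-comparison step is the min-with-priority step over prefix tests
theorem step_eq_min (title : List Char) (i : Nat) (kp : List Char × Nat) (b : Nat) :
    (if kp.2 < b ∧ PySem.List.slice title (some (i : Int)) (some ((i : Int) + (kp.1.length : Int))) = kp.1
      then kp.2 else b)
    = (if kp.1 <+: title.drop i then min b kp.2 else b) := by
  rw [PySem.List.slice_natCast_add]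
  by_cases hc : kp.1 <+: title.drop i
  · have ht : (title.drop i).take kp.1.length = kp.1 := (List.prefix_iff_eq_take.mp hc).symm
    simp only [ht, hc, and_true, if_true]
    by_cases hlt : kp.2 < b
    · simp [hlt]; omega
    · simp [hlt]; omega
  · have ht : (title.drop i).take kp.1.length ≠ kp.1 :=
      fun h => hc (h ▸ List.take_prefix _ _)
    simp [ht, hc]

-- a nonempty keyword is an infix iff it is a prefix at some position strictly inside the list
theorem bounded_prefix_iff_isIn (kw title : List Char) (hk : kw ≠ []) :
    (∃ i < title.length, kw <+: title.drop i) ↔ PySem.Chars.isIn kw title = true := by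
  rw [← PySem.Chars.exists_prefix_drop_iff_isIn]
  constructor
  · rintro ⟨i, _, hp⟩; exact ⟨i, hp⟩
  · rintro ⟨j, hp⟩
    by_cases hj : j < title.length
    · exact ⟨j, hj, hp⟩
    · exfalso
      rw [List.drop_eq_nil_of_le (le_of_not_gt hj)] at hp
      exact hk (List.prefix_nil.mp hp)

theorem pvBest_le (title : List Char) (p : Nat) :
    pvBest title ≤ p ↔
      3 ≤ p ∨ ∃ kw pr, (kw, pr) ∈ pvKeywords ∧ pr ≤ p ∧ ∃ i < title.length, kw <+: title.drop i := by
  unfold pvBest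
  have h1 : ∀ (b : Nat) (i : Nat),
      pvKeywords.foldl
        (fun b kp =>
          if kp.2 < b ∧ PySem.List.slice title (some (i : Int)) (some ((i : Int) + (kp.1.length : Int))) = kp.1
          then kp.2 else b) b
      = (pvKeywords.map (fun kp => (i, kp))).foldl
          (fun b (x : Nat × (List Char × Nat)) =>
            if x.2.1 <+: title.drop x.1 then min b x.2.2 else b) b := by
    intro b i
    rw [List.foldl_map]
    apply PySem.List.foldl_congr_mem
    intro b kp _
    exact step_eq_min title i kp b
  have h2 : (List.range title.length).foldl
      (fun (best : Nat) (i : Nat) => pvKeywords.foldl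
        (fun b kp =>
          if kp.2 < b ∧ PySem.List.slice title (some (i : Int)) (some ((i : Int) + (kp.1.length : Int))) = kp.1
          then kp.2 else b) best) 3
      = ((List.range title.length).flatMap (fun i => pvKeywords.map (fun kp => (i, kp)))).foldl
          (fun b (x : Nat × (List Char × Nat)) =>
            if x.2.1 <+: title.drop x.1 then min b x.2.2 else b) 3 := by
    rw [← foldl_foldl_flatMap]
    apply PySem.List.foldl_congr_mem
    intro b i _
    exact h1 b i
  rw [h2, foldl_prio_le (fun (x : Nat × (List Char × Nat)) => x.2.1 <+: title.drop x.1)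
        (fun x => x.2.2)]
  constructor
  · rintro (h3 | ⟨x, hx, hc, hf⟩)
    · exact Or.inl h3
    · simp only [List.mem_flatMap, List.mem_map, List.mem_range] at hx
      obtain ⟨i, hi, kp, hkp, rfl⟩ := hx
      exact Or.inr ⟨kp.1, kp.2, by simpa using hkp, hf, i, hi, hc⟩
  · rintro (h3 | ⟨kw, pr, hkp, hpr, i, hi, hc⟩)
    · exact Or.inl h3
    · refine Or.inr ⟨(i, (kw, pr)), ?_, hc, hpr⟩
      simp only [List.mem_flatMap, List.mem_map, List.mem_range]
      exact ⟨i, hi, (kw, pr), hkp, rfl⟩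

theorem keywords_ne_nil : ∀ kp ∈ pvKeywords, kp.1 ≠ [] := by decide

-- the three priority groups, for the proofs below
def pvG0 : List (List Char) := ["divide".toList, "interest".toList, "discount".toList, "calculator".toList]
def pvG1 : List (List Char) := ["email".toList, "mask".toList, "account".toList, "auth".toList, "password".toList]
def pvG2 : List (List Char) := ["currency".toList, "format".toList, "truncate".toList, "date".toList, "utils".toList]

theorem memG0 : ∀ k ∈ pvG0, (k, 0) ∈ pvKeywords := by decide
theorem memG1 : ∀ k ∈ pvG1, (k, 1) ∈ pvKeywords := by decide
theorem memG2 : ∀ k ∈ pvG2, (k, 2) ∈ pvKeywords := by decide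
theorem prio_le0 : ∀ kp ∈ pvKeywords, kp.2 ≤ 0 → kp.1 ∈ pvG0 := by decide
theorem prio_le1 : ∀ kp ∈ pvKeywords, kp.2 ≤ 1 → kp.1 ∈ pvG0 ∨ kp.1 ∈ pvG1 := by decide
theorem prio_le2 : ∀ kp ∈ pvKeywords, kp.2 ≤ 2 → kp.1 ∈ pvG0 ∨ kp.1 ∈ pvG1 ∨ kp.1 ∈ pvG2 := by decide

theorem er_iff (L : List Char) (p : Nat) : pvBest L ≤ p ↔
    3 ≤ p ∨ ∃ kw pr, (kw, pr) ∈ pvKeywords ∧ pr ≤ p ∧ PySem.Chars.isIn kw L = true := by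
  rw [pvBest_le]
  refine or_congr_right ⟨?_, ?_⟩ <;> rintro ⟨kw, pr, hm, hp, h⟩ <;> refine ⟨kw, pr, hm, hp, ?_⟩
  · exact (bounded_prefix_iff_isIn kw L (keywords_ne_nil (kw, pr) hm)).mp h
  · exact (bounded_prefix_iff_isIn kw L (keywords_ne_nil (kw, pr) hm)).mpr h

theorem pvBest_eval (L : List Char) :
    pvFiles.getD (pvBest L) "" =
      (if pvG0.any (fun k => PySem.Chars.isIn k L) then "calculator.py"
       else if pvG1.any (fun k => PySem.Chars.isIn k L) then "auth.py"
       else if pvG2.any (fun k => PySem.Chars.isIn k L) then "utils.py"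
       else "unknown") := by
  have h3 : pvBest L ≤ 3 := (er_iff L 3).mpr (Or.inl le_rfl)
  have up : ∀ (G : List (List Char)) (p : Nat), (∀ k ∈ G, (k, p) ∈ pvKeywords) →
      G.any (fun k => PySem.Chars.isIn k L) = true → pvBest L ≤ p := by
    intro G p hmem hG
    obtain ⟨k, hk, hin⟩ := List.any_eq_true.mp hG
    exact (er_iff L p).mpr (Or.inr ⟨k, p, hmem k hk, le_rfl, hin⟩)
  by_cases h0 : pvG0.any (fun k => PySem.Chars.isIn k L) = true
  · rw [if_pos h0, Nat.le_zero.mp (up pvG0 0 memG0 h0)]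
    rfl
  · rw [if_neg h0]
    have n0 : ¬ pvBest L ≤ 0 := by
      intro h
      obtain ⟨kw, pr, hm, hp, hin⟩ := ((er_iff L 0).mp h).resolve_left (by omega)
      exact h0 (List.any_eq_true.mpr ⟨kw, prio_le0 (kw, pr) hm hp, hin⟩)
    by_cases h1 : pvG1.any (fun k => PySem.Chars.isIn k L) = true
    · rw [if_pos h1, show pvBest L = 1 from by have := up pvG1 1 memG1 h1; omega]
      rfl
    · rw [if_neg h1]
      have n1 : ¬ pvBest L ≤ 1 := by
        intro h
        obtain ⟨kw, pr, hm, hp, hin⟩ := ((er_iff L 1).mp h).resolve_left (by omega)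
        rcases prio_le1 (kw, pr) hm hp with hg | hg
        · exact h0 (List.any_eq_true.mpr ⟨kw, hg, hin⟩)
        · exact h1 (List.any_eq_true.mpr ⟨kw, hg, hin⟩)
      by_cases h2 : pvG2.any (fun k => PySem.Chars.isIn k L) = true
      · rw [if_pos h2, show pvBest L = 2 from by have := up pvG2 2 memG2 h2; omega]
        rfl
      · rw [if_neg h2]
        have n2 : ¬ pvBest L ≤ 2 := by
          intro h
          obtain ⟨kw, pr, hm, hp, hin⟩ := ((er_iff L 2).mp h).resolve_left (by omega)
          rcases prio_le2 (kw, pr) hm hp with hg | hg | hg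
          · exact h0 (List.any_eq_true.mpr ⟨kw, hg, hin⟩)
          · exact h1 (List.any_eq_true.mpr ⟨kw, hg, hin⟩)
          · exact h2 (List.any_eq_true.mpr ⟨kw, hg, hin⟩)
        rw [show pvBest L = 3 from by omega]
        rfl

-- ===== VERDICT (by name: the statement is the Claim_ definition above) =====
theorem guess_file_py_spec : Claim_equal_guess_file_py := by
  intro issue _ _
  unfold Spec_guess_file_py guess_file_py guess_file_py_alt
  cases h : (PySem.Dict.mk issue).get? "title" with
  | none => rfl
  | some t =>
    dsimp only
    rw [pvBest_eval]
    simp [pvG0, pvG1, pvG2, List.any_cons, List.any_nil]
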